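-- pv_equiv track=rewrite | github.com/aldoremiae-e/BOJ | 프로그래머스/unrated/181928. 이어 붙인 수/이어 붙인 수.py | solution
-- ===== SOURCE A (Python) =====
-- def solution(nums):
--     answer = 0
--     even_mul = 1
--     add_mul = 1
--     even_num, add_num = 0, 0
--     for i in range(len(nums)-1, -1, -1):
--         if nums[i] % 2:
--             add_num += (nums[i] * add_mul)
--             add_mul *= 10
--         else:
--             even_num += (nums[i] * even_mul)
--             even_mul *= 10
--     answer = add_num + even_num
--     return answer
-- ===== SOURCE B (Python) =====
-- def solution(nums):
--     odds = [x for x in nums if x % 2]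
--     evens = [x for x in nums if not x % 2]
--
--     def horner(lst):
--         v = 0
--         for x in lst:
--             v = v * 10 + x
--         return v
--
--     return horner(odds) + horner(evens)
-- ===== Notes on version B (the rewrite author's own statement) =====
-- stated objective: simpler
-- what changed: B partitions nums by parity (forward order) and computes each concatenated value with a forward Horner fold v = v*10 + x, instead of A's single backward index loop maintaining two running place-value multipliers.
import Mathlib
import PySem

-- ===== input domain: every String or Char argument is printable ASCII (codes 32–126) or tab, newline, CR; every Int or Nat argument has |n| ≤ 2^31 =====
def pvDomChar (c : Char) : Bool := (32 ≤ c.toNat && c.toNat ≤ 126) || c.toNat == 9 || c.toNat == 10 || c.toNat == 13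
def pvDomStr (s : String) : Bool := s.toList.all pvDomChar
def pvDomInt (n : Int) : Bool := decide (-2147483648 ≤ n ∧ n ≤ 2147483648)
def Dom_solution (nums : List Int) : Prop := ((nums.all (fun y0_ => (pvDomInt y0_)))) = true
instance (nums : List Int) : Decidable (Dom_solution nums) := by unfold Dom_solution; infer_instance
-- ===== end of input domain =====

-- B partitions nums by parity and uses a forward Horner fold (v = v*10 + x) per class; objective: simpler.


-- ===== PORT A =====
-- A iterates i = len-1 … 0 reading nums[i]; ported as a fold over nums.reverse with
-- the same four-part state (add_num, add_mul, even_num, even_mul).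
def solution (nums : List Int) : Int :=
  let st := nums.reverse.foldl
    (fun (s : Int × Int × Int × Int) x =>
      let (addNum, addMul, evenNum, evenMul) := s
      if PySem.Int.mod x 2 ≠ 0 then
        (addNum + x * addMul, addMul * 10, evenNum, evenMul)
      else
        (addNum, addMul, evenNum + x * evenMul, evenMul * 10))
    (0, 1, 0, 1)
  st.1 + st.2.2.1

-- ===== PORT B =====
def hornerB (l : List Int) : Int := l.foldl (fun v x => v * 10 + x) 0

def solution_alt (nums : List Int) : Int :=
  hornerB (nums.filter (fun x => PySem.Int.mod x 2 ≠ 0)) +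
  hornerB (nums.filter (fun x => !(PySem.Int.mod x 2 ≠ 0)))

-- ===== PRECONDITION & SPEC =====
def Spec_solution (nums : List Int) (out : Int) : Prop := out = solution_alt nums
instance (nums : List Int) (out : Int) : Decidable (Spec_solution nums out) := by unfold Spec_solution; infer_instance

-- ===== CLAIM (what is proved, stated in full; the proofs are below) =====
def Claim_equal_solution : Prop := ∀ (nums : List Int), Dom_solution nums → Spec_solution nums (solution nums)

-- ===== LEMMAS AND PROOFS =====

-- ===== VERDICT (by name: the statement is the Claim_ definition above) =====
def stepA (s : Int × Int × Int × Int) (x : Int) : Int × Int × Int × Int :=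
  if PySem.Int.mod x 2 ≠ 0 then
    (s.1 + x * s.2.1, s.2.1 * 10, s.2.2.1, s.2.2.2)
  else
    (s.1, s.2.1, s.2.2.1 + x * s.2.2.2, s.2.2.2 * 10)

theorem hornerB_shift (l : List Int) (v : Int) :
    l.foldl (fun v x => v * 10 + x) v = v * 10 ^ l.length + hornerB l := by
  induction l generalizing v with
  | nil => simp [hornerB]
  | cons a t ih =>
    simp only [List.foldl_cons, List.length_cons]
    rw [ih (v * 10 + a)]
    conv_rhs => rw [hornerB, List.foldl_cons, ih (0 * 10 + a)]
    ring

theorem hornerB_cons (a : Int) (t : List Int) :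
    hornerB (a :: t) = a * 10 ^ t.length + hornerB t := by
  simpa [hornerB] using hornerB_shift t a

theorem loopA_eq (nums : List Int) (aN aM eN eM : Int) :
    nums.reverse.foldl stepA (aN, aM, eN, eM) =
      (aN + hornerB (nums.filter (fun x => PySem.Int.mod x 2 ≠ 0)) * aM,
       aM * 10 ^ (nums.filter (fun x => PySem.Int.mod x 2 ≠ 0)).length,
       eN + hornerB (nums.filter (fun x => !(PySem.Int.mod x 2 ≠ 0))) * eM,
       eM * 10 ^ (nums.filter (fun x => !(PySem.Int.mod x 2 ≠ 0))).length) := by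
  induction nums generalizing aN aM eN eM with
  | nil => simp [hornerB]
  | cons a t ih =>
    simp only [List.reverse_cons, List.foldl_append, List.foldl_cons, List.foldl_nil, ih]
    by_cases h : PySem.Int.mod a 2 ≠ 0
    · have hd : (decide (PySem.Int.mod a 2 ≠ 0)) = true := decide_eq_true h
      simp only [stepA, if_pos h, List.filter_cons, hd, Bool.not_true, Bool.false_eq_true, reduceIte,
        hornerB_cons, List.length_cons, Prod.mk.injEq]
      and_intros <;> first | trivial | ring
    · have hd : (decide (PySem.Int.mod a 2 ≠ 0)) = false := decide_eq_false h
      simp only [stepA, if_neg h, List.filter_cons, hd, Bool.not_false, Bool.false_eq_true, reduceIte,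
        hornerB_cons, List.length_cons, Prod.mk.injEq]
      and_intros <;> first | trivial | ring

theorem solution_spec : Claim_equal_solution := by
  intro nums _
  unfold Spec_solution solution solution_alt
  have hstep : (fun (s : Int × Int × Int × Int) x =>
      let (addNum, addMul, evenNum, evenMul) := s
      if PySem.Int.mod x 2 ≠ 0 then
        (addNum + x * addMul, addMul * 10, evenNum, evenMul)
      else
        (addNum, addMul, evenNum + x * evenMul, evenMul * 10)) = stepA := by
    funext s x
    cases s with
    | mk a s2 => cases s2 with
      | mk b s3 => cases s3 with
        | mk c d => simp [stepA]
  simp only [hstep, loopA_eq]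
  ring
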